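-- pv_equiv track=rewrite | github.com/ttaerrim/algorithm | programmers/155652.py | solution
-- ===== SOURCE A (Python) =====
-- def solution(s, skip, index):
--     answer = ''
--
--     for letter in s:
--         idx = ord(letter)
--         count = index
--         while count:
--             idx += 1
--             if idx > ord('z'):
--                 idx = idx%ord('z') + 96
--             if chr(idx) not in skip:
--                 count -= 1
--         answer += chr(idx)
--
--     return answer
-- ===== SOURCE B (Python) =====
-- def solution(s, skip, index):
--     allowed = [c for c in range(97, 123) if chr(c) not in skip]
--     res = []
--     for letter in s:
--         if index == 0:
--             res.append(letter)
--             continue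
--         o = ord(letter)
--         e = o + 1 if o + 1 <= 122 else (o + 1) % 122 + 96
--         seg = [c for c in range(e, 123) if chr(c) not in skip]
--         if index <= len(seg):
--             res.append(chr(seg[index - 1]))
--         else:
--             res.append(chr(allowed[(index - len(seg) - 1) % len(allowed)]))
--     return ''.join(res)
-- ===== Notes on version B (the rewrite author's own statement) =====
-- stated objective: faster
-- what changed: A advances each letter one code at a time, re-testing skip membership index times per letter; B precomputes the ordered non-skip codes of the straight segment up to 'z' and of the alphabet cycle, and jumps to the answer by one count and one modular index, making the per-letter cost independent of index.
import Mathlib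
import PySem

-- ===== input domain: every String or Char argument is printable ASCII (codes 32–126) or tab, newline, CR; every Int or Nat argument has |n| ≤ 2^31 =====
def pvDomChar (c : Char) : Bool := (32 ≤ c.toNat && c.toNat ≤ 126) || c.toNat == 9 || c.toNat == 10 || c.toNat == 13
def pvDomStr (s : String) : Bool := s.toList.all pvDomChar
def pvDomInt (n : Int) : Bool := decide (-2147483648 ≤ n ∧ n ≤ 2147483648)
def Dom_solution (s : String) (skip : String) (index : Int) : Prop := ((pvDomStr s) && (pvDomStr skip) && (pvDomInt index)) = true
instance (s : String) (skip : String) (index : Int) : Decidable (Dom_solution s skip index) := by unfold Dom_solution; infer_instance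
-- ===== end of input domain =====

-- B replaces A's per-letter step-by-step walk (O(index) steps per letter) by a direct
-- jump: count the non-skip codes in the straight segment up to 'z', then index the
-- precomputed non-skip alphabet modularly (O(1) alphabet scans per letter).

-- shared membership test: Python's `chr(c) not in skip` (both sources use this exact test)
def pvFree (skip : List Char) (c : Int) : Bool := !(skip.contains (Char.ofNat c.toNat))

-- ===== PORT A =====
-- A's inner `while count:` loop; fuel makes the same computation total (Pre_ rules out
-- the inputs where the Python loop never terminates, and there the fuel is sufficient).
def pvLoopA (skip : List Char) (idx : Int) (count : Int) : Nat → Int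
  | 0 => idx
  | fuel+1 =>
    if count ≠ 0 then
      let idx1 := idx + 1
      let idx2 := if idx1 > 122 then PySem.Int.mod idx1 122 + 96 else idx1
      let count2 := if pvFree skip idx2 then count - 1 else count
      pvLoopA skip idx2 count2 fuel
    else idx

def solution (s : String) (skip : String) (index : Int) : String :=
  s.toList.foldl
    (fun answer letter =>
      answer ++ String.singleton
        (Char.ofNat (pvLoopA skip.toList (letter.toNat : Int) index (123 + 26 * index.toNat)).toNat))
    ""

-- ===== PORT B =====
def solution_alt (s : String) (skip : String) (index : Int) : String :=
  let allowed := (PySem.List.pyRange 97 123 1).filter (pvFree skip.toList)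
  String.ofList (s.toList.map (fun letter =>
    if index = 0 then letter
    else
      let o : Int := (letter.toNat : Int)
      let e : Int := if o + 1 ≤ 122 then o + 1 else PySem.Int.mod (o + 1) 122 + 96
      let seg := (PySem.List.pyRange e 123 1).filter (pvFree skip.toList)
      if index ≤ (seg.length : Int) then
        -- seg[index-1]: in range in this branch (1 ≤ index ≤ len(seg))
        Char.ofNat ((PySem.List.pyGetD seg (index - 1) 0).toNat)
      else
        -- allowed[(index-len(seg)-1) % len(allowed)]: in range under Pre_ (allowed ≠ [])
        Char.ofNat ((PySem.List.pyGetD allowed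
          (PySem.Int.mod (index - (seg.length : Int) - 1) (allowed.length : Int)) 0).toNat)))

-- ===== PRECONDITION & SPEC =====
-- the ordered list of non-skip codes in [e, 122] (used by Pre_ and the lemmas)
def pvSeg (skip : List Char) (e : Int) : List Int :=
  (PySem.List.pyRange e 123 1).filter (pvFree skip)

-- the code A's first wrap lands the walk of `letter` on (the segment start)
def pvEntry (letter : Char) : Int :=
  if (letter.toNat : Int) + 1 ≤ 122 then (letter.toNat : Int) + 1
  else PySem.Int.mod ((letter.toNat : Int) + 1) 122 + 96

-- Pre_ excludes exactly the inputs on which A's `while count:` loop never terminates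
-- (A returns nothing there): a negative index with a nonempty s, or some letter whose
-- walk needs more steps than its straight segment offers while every lowercase letter
-- is in skip (the cycle then never decrements count).
def Pre_solution (s : String) (skip : String) (index : Int) : Prop :=
  s.toList = [] ∨ (0 ≤ index ∧
    (pvSeg skip.toList 97 ≠ [] ∨ ∀ c ∈ s.toList, index ≤ ((pvSeg skip.toList (pvEntry c)).length : Int)))
instance (s : String) (skip : String) (index : Int) : Decidable (Pre_solution s skip index) := by
  unfold Pre_solution; infer_instance

def pvWitness_solution : String × String × Int := ("ab", "b", 2)

def Spec_solution (s : String) (skip : String) (index : Int) (out : String) : Prop := out = solution_alt s skip index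
instance (s : String) (skip : String) (index : Int) (out : String) : Decidable (Spec_solution s skip index out) := by unfold Spec_solution; infer_instance

-- ===== CLAIM (what is proved, stated in full; the proofs are below) =====
def Claim_equal_solution : Prop := ∀ (s : String) (skip : String) (index : Int), Dom_solution s skip index → Pre_solution s skip index → Spec_solution s skip index (solution s skip index)

-- ===== LEMMAS AND PROOFS =====

theorem pvLoopA_zero (skip : List Char) (idx : Int) (fuel : Nat) :
    pvLoopA skip idx 0 fuel = idx := by
  cases fuel <;> simp [pvLoopA]

theorem pvSeg_cons (skip : List Char) (e : Int) (he : e < 123) :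
    pvSeg skip e = (if pvFree skip e then [e] else []) ++ pvSeg skip (e+1) := by
  unfold pvSeg
  rw [PySem.List.pyRange_one_cons he]
  by_cases h : pvFree skip e <;> simp [h]

theorem pvSeg_nil (skip : List Char) : pvSeg skip 123 = [] := by
  unfold pvSeg
  rw [PySem.List.pyRange_one_eq_nil (by omega)]
  rfl

-- segment walk: starting just before e (≤ 122), A's loop either stops at the n-th
-- non-skip code of [e,122], or exits the segment at 122 with the count reduced by
-- the number of non-skip codes in [e,122], having consumed exactly (123-e) fuel.
theorem pvLoopA_seg (skip : List Char) :
    ∀ (fuel : Nat) (e : Int) (n : Nat), e ≤ 122 → 1 ≤ n → (123 - e).toNat ≤ fuel →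
      (n ≤ (pvSeg skip e).length → pvLoopA skip (e-1) (n : Int) fuel = (pvSeg skip e).getD (n-1) 0)
      ∧ ((pvSeg skip e).length < n → pvLoopA skip (e-1) (n : Int) fuel
            = pvLoopA skip 122 ((n - (pvSeg skip e).length : Nat) : Int) (fuel - (123 - e).toNat)) := by
  intro fuel
  induction fuel with
  | zero => intro e n he hn hf; omega
  | succ f ih =>
    intro e n he hn hf
    have hne : (n : Int) ≠ 0 := by
      intro h; omega
    have unf : pvLoopA skip (e-1) (n : Int) (f+1)
        = pvLoopA skip e (if pvFree skip e then (n : Int) - 1 else (n : Int)) f := by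
      simp only [pvLoopA, if_pos hne]
      have h1 : e - 1 + 1 = e := by ring
      rw [h1, if_neg (by omega : ¬ e > 122)]
    have hcons := pvSeg_cons skip e (by omega)
    by_cases hfree : pvFree skip e
    · simp only [hfree, if_true] at hcons unf
      simp only [List.singleton_append] at hcons
      rw [show (n:Int) - 1 = ((n-1 : Nat) : Int) by omega] at unf
      by_cases hn1 : n = 1
      · subst hn1
        simp only [Nat.sub_self, Nat.cast_zero, pvLoopA_zero] at unf
        constructor
        · intro _; rw [unf, hcons]; simp
        · intro hlt; rw [hcons] at hlt; simp at hlt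
      · have hn2 : 2 ≤ n := by omega
        by_cases he' : e = 122
        · subst he'
          have hseg : pvSeg skip 122 = [122] := by
            rw [hcons, show (122:Int)+1 = 123 by norm_num, pvSeg_nil]
          constructor
          · intro hle; rw [hseg] at hle; simp at hle; omega
          · intro _
            rw [unf, hseg]
            norm_num
        · have he1 : e + 1 - 1 = e := by ring
          obtain ⟨IH1, IH2⟩ := ih (e+1) (n-1) (by omega) (by omega) (by omega)
          rw [he1] at IH1 IH2
          have hlen : (pvSeg skip e).length = (pvSeg skip (e+1)).length + 1 := by
            rw [hcons]; simp
          constructor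
          · intro hle
            rw [unf, IH1 (by omega), hcons]
            rw [show n - 1 = (n - 2) + 1 by omega, List.getD_cons_succ]
            norm_num
          · intro hlt
            rw [unf, IH2 (by omega)]
            rw [show n - 1 - (pvSeg skip (e+1)).length = n - (pvSeg skip e).length by omega,
                show f - (123 - (e+1)).toNat = f + 1 - (123 - e).toNat by omega]
    · simp only [Bool.not_eq_true] at hfree
      simp only [hfree, Bool.false_eq_true, if_false, List.nil_append] at hcons unf
      by_cases he' : e = 122
      · subst he'
        have hseg : pvSeg skip 122 = [] := by
          rw [hcons, show (122:Int)+1 = 123 by norm_num, pvSeg_nil]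
        constructor
        · intro hle; rw [hseg] at hle; simp at hle; omega
        · intro _
          rw [unf, hseg]
          norm_num
      · have he1 : e + 1 - 1 = e := by ring
        obtain ⟨IH1, IH2⟩ := ih (e+1) n (by omega) (by omega) (by omega)
        rw [he1] at IH1 IH2
        constructor
        · intro hle
          rw [unf, IH1 (by rw [hcons] at hle; omega), hcons]
        · intro hlt
          rw [unf, IH2 (by rw [hcons] at hlt; omega), hcons]
          rw [show f - (123 - (e+1)).toNat = f + 1 - (123 - e).toNat by omega]

-- wrapping: from 122 the next visited code is 97, the same as from 96
theorem pvLoopA_wrap (skip : List Char) (c : Int) (fuel : Nat) (hc : c ≠ 0) (hf : 1 ≤ fuel) :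
    pvLoopA skip 122 c fuel = pvLoopA skip 96 c fuel := by
  obtain ⟨f, rfl⟩ : ∃ f, fuel = f + 1 := ⟨fuel - 1, by omega⟩
  have h97 : Int.fmod 123 122 + 96 = (97:Int) := by decide
  simp only [pvLoopA, if_pos hc]
  norm_num [PySem.Int.mod, h97]

-- laps: from 122 with n decrements left, the answer is the ((n-1) mod L)-th allowed letter
theorem pvLoopA_lap (skip : List Char) (hA : pvSeg skip 97 ≠ []) :
    ∀ (n : Nat), 1 ≤ n → ∀ (fuel : Nat), 26 * n ≤ fuel →
      pvLoopA skip 122 (n : Int) fuel = (pvSeg skip 97).getD ((n-1) % (pvSeg skip 97).length) 0 := by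
  intro n
  induction n using Nat.strong_induction_on with
  | _ n ih =>
    intro hn fuel hfuel
    have hL : 1 ≤ (pvSeg skip 97).length := List.length_pos_of_ne_nil hA
    have hw := pvLoopA_wrap skip (n : Int) fuel (by intro h; omega) (by omega)
    rw [hw, show (96:Int) = 97 - 1 by norm_num]
    obtain ⟨S1, S2⟩ := pvLoopA_seg skip fuel 97 n (by norm_num) hn (by omega)
    by_cases hle : n ≤ (pvSeg skip 97).length
    · rw [S1 hle]
      congr 1
      exact (Nat.mod_eq_of_lt (by omega)).symm
    · rw [S2 (by omega)]
      have h26 : ((123:Int) - 97).toNat = 26 := by decide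
      have hrec := ih (n - (pvSeg skip 97).length) (by omega) (by omega)
        (fuel - ((123:Int) - 97).toNat) (by rw [h26]; omega)
      rw [hrec]
      congr 1
      rw [show (n-1) % (pvSeg skip 97).length
            = ((n-1) - (pvSeg skip 97).length) % (pvSeg skip 97).length
          from Nat.mod_eq_sub_mod (by omega)]
      congr 1
      omega

-- entering from a code in [122,126] lands on the same code as entering from (wrapped-1)
theorem pvLoopA_entry_high (skip : List Char) (o : Int) (h1 : 122 ≤ o) (h2 : o ≤ 126)
    (cnt : Int) (hc : cnt ≠ 0) (fuel : Nat) (hf : 1 ≤ fuel) :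
    pvLoopA skip o cnt fuel = pvLoopA skip (PySem.Int.mod (o+1) 122 + 96 - 1) cnt fuel := by
  obtain ⟨f, rfl⟩ : ∃ f, fuel = f + 1 := ⟨fuel - 1, by omega⟩
  have m1 : Int.fmod 123 122 = 1 := by decide
  have m2 : Int.fmod 124 122 = 2 := by decide
  have m3 : Int.fmod 125 122 = 3 := by decide
  have m4 : Int.fmod 126 122 = 4 := by decide
  have m5 : Int.fmod 127 122 = 5 := by decide
  interval_cases o <;> simp only [pvLoopA, if_pos hc] <;> norm_num [PySem.Int.mod, m1, m2, m3, m4, m5]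

-- wrapped entry code bounds
theorem pvEntry_high_bounds (o : Int) (h1 : 122 ≤ o) (h2 : o ≤ 126) :
    97 ≤ PySem.Int.mod (o+1) 122 + 96 ∧ PySem.Int.mod (o+1) 122 + 96 ≤ 101 := by
  interval_cases o <;> constructor <;> decide

-- `answer += chr(...)` accumulation equals ofList ∘ map
theorem pvFoldSingleton (f : Char → Char) : ∀ (l : List Char) (acc : String),
    l.foldl (fun a c => a ++ String.singleton (f c)) acc = acc ++ String.ofList (l.map f) := by
  intro l
  induction l with
  | nil => intro acc; apply String.toList_inj.mp; simp
  | cons a l ih =>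
    intro acc
    simp only [List.foldl_cons, List.map_cons]
    rw [ih]
    apply String.toList_inj.mp; simp

-- per-letter equality for a positive index (the heart of the claim); the hypothesis
-- hT is exactly Pre_solution's per-letter termination condition for this letter.
theorem pvLetter (skipL : List Char) (index : Int) (hi : 1 ≤ index)
    (c : Char) (hc : pvDomChar c = true)
    (hT : pvSeg skipL 97 ≠ [] ∨ index ≤ ((pvSeg skipL (pvEntry c)).length : Int)) :
    Char.ofNat (pvLoopA skipL ((c.toNat : Int)) index (123 + 26 * index.toNat)).toNat =
      (if index ≤ ((pvSeg skipL (if (c.toNat : Int) + 1 ≤ 122 then (c.toNat : Int) + 1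
            else PySem.Int.mod ((c.toNat : Int) + 1) 122 + 96)).length : Int) then
        Char.ofNat ((PySem.List.pyGetD (pvSeg skipL (if (c.toNat : Int) + 1 ≤ 122 then (c.toNat : Int) + 1
            else PySem.Int.mod ((c.toNat : Int) + 1) 122 + 96)) (index - 1) 0).toNat)
      else
        Char.ofNat ((PySem.List.pyGetD (pvSeg skipL 97)
          (PySem.Int.mod (index - ((pvSeg skipL (if (c.toNat : Int) + 1 ≤ 122 then (c.toNat : Int) + 1
            else PySem.Int.mod ((c.toNat : Int) + 1) 122 + 96)).length : Int) - 1)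
            ((pvSeg skipL 97).length : Int)) 0).toNat)) := by
  have ho : 9 ≤ (c.toNat : Int) ∧ (c.toNat : Int) ≤ 126 := by
    unfold pvDomChar at hc
    simp at hc
    omega
  set o : Int := (c.toNat : Int) with ho_def
  set E : Int := (if o + 1 ≤ 122 then o + 1 else PySem.Int.mod (o + 1) 122 + 96) with hE_def
  have hEntry : pvEntry c = E := by rw [pvEntry, hE_def]
  rw [hEntry] at hT
  set n : Nat := index.toNat with hn_def
  have hncast : (n : Int) = index := Int.toNat_of_nonneg (by omega)
  have hn1 : 1 ≤ n := by omega
  have hEb : 10 ≤ E ∧ E ≤ 122 := by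
    rw [hE_def]
    by_cases h : o + 1 ≤ 122
    · rw [if_pos h]; omega
    · rw [if_neg h]
      have := pvEntry_high_bounds o (by omega) (by omega)
      omega
  have hstart : pvLoopA skipL o index (123 + 26 * n) = pvLoopA skipL (E - 1) index (123 + 26 * n) := by
    rw [hE_def]
    by_cases h : o + 1 ≤ 122
    · rw [if_pos h, show o + 1 - 1 = o by ring]
    · rw [if_neg h]
      exact pvLoopA_entry_high skipL o (by omega) (by omega) index (by omega) _ (by omega)
  rw [← hncast] at hstart ⊢
  obtain ⟨S1, S2⟩ := pvLoopA_seg skipL (123 + 26 * n) E n hEb.2 hn1 (by omega)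
  by_cases hle : n ≤ (pvSeg skipL E).length
  · rw [if_pos (by exact_mod_cast hle), hstart, S1 hle,
      show (n : Int) - 1 = ((n - 1 : Nat) : Int) by omega, PySem.List.pyGetD_natCast]
  · have hA : pvSeg skipL 97 ≠ [] := by
      rcases hT with h | h
      · exact h
      · exfalso; rw [← hncast] at h; exact hle (by exact_mod_cast h)
    rw [if_neg (by exact_mod_cast hle)]
    rw [hstart, S2 (by omega)]
    rw [pvLoopA_lap skipL hA (n - (pvSeg skipL E).length) (by omega) _ (by omega)]
    rw [show (n : Int) - ((pvSeg skipL E).length : Int) - 1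
          = ((n - (pvSeg skipL E).length - 1 : Nat) : Int) by omega]
    rw [show ((pvSeg skipL 97).length : Int) = ((((pvSeg skipL 97).length : Nat)) : Int) by norm_num]
    rw [PySem.Int.mod_natCast, PySem.List.pyGetD_natCast]

-- ===== VERDICT (by name: the statement is the Claim_ definition above) =====
theorem solution_spec : Claim_equal_solution := by
  intro s skip index hdom hpre
  unfold Spec_solution solution solution_alt
  rw [pvFoldSingleton]
  apply String.toList_inj.mp
  simp only [String.toList_append, String.toList_ofList, String.toList_empty, List.nil_append]
  apply List.map_congr_left
  intro c hcmem
  have hcdom : pvDomChar c = true := by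
    unfold Dom_solution pvDomStr at hdom
    simp only [Bool.and_eq_true, List.all_eq_true] at hdom
    exact hdom.1.1 c hcmem
  rcases hpre with hnil | ⟨hi0, hT'⟩
  · exact absurd hcmem (by rw [hnil]; exact List.not_mem_nil)
  have hT : pvSeg skip.toList 97 ≠ [] ∨ index ≤ ((pvSeg skip.toList (pvEntry c)).length : Int) := by
    rcases hT' with h | h
    · exact Or.inl h
    · exact Or.inr (h c hcmem)
  by_cases hi : index = 0
  · subst hi
    simp [pvLoopA_zero, Char.ofNat_toNat]
  · rw [if_neg hi]
    exact pvLetter skip.toList index (by omega) c hcdom hT
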